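-- pv_equiv track=rewrite | github.com/HI233304/dynamic-ai-chatbot | nlp.py | extract_entities_rule
-- ===== SOURCE A (Python) =====
-- from typing import Tuple, Dict
--
-- def extract_entities_rule(text: str) -> Dict[str,str]:
--     ents = {}
--     tokens = text.split()
--     for tok in tokens:
--         if tok.lower().startswith('#') or tok.lower().startswith('ord'):
--             ents['order_id'] = tok.strip('.,')
--         if '@' in tok and '.' in tok:
--             ents['email'] = tok.strip('.,')
--     return ents
-- ===== SOURCE B (Python) =====
-- def extract_entities_rule(text: str) -> dict:
--     tokens = text.split()
--     orders = [t for t in tokens if t.lower().startswith(('#', 'ord'))]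
--     emails = [t for t in tokens if '@' in t and '.' in t]
--     ents = {}
--     if orders:
--         ents['order_id'] = orders[-1].strip('.,')
--     if emails:
--         ents['email'] = emails[-1].strip('.,')
--     return ents
-- ===== Notes on version B (the rewrite author's own statement) =====
-- stated objective: alternative
-- what changed: Replaces A's single stateful loop with dict overwrites by two independent comprehension passes (one per entity) and a closed-form assembly taking the last match of each; Pre_ excludes texts where the first email token precedes the first order token, on which A's dict-key insertion order (email before order_id) is accidental while B always emits order_id first.
import Mathlib
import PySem

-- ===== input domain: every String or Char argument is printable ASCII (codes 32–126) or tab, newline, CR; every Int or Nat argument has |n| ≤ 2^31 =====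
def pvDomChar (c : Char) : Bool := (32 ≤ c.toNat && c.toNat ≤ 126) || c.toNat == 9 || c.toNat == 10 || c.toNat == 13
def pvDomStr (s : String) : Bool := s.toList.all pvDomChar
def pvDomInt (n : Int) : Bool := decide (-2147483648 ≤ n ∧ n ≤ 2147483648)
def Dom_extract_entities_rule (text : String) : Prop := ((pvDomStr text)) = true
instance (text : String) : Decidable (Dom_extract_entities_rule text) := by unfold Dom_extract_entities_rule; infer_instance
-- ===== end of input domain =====

-- B replaces A's stateful token loop by two independent comprehension passes and a
-- closed-form assembly (last match of each entity, keys always order_id-first); same cost.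

-- ===== PORT A =====
-- one loop iteration of A's 'for tok in tokens'
def pvStepA (d : PySem.Dict String String) (tok : String) : PySem.Dict String String :=
  let d1 := if PySem.Str.startswith (PySem.Str.lower tok) "#"
               || PySem.Str.startswith (PySem.Str.lower tok) "ord"
            then d.insert "order_id" (PySem.Str.stripChars tok ".,") else d
  if PySem.Str.isIn "@" tok && PySem.Str.isIn "." tok
  then d1.insert "email" (PySem.Str.stripChars tok ".,") else d1

def extract_entities_rule (text : String) : List (String × String) :=
  ((PySem.Str.split₀ text).foldl pvStepA PySem.Dict.empty).items

-- ===== PORT B =====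
-- t.lower().startswith(('#', 'ord'))
def pvIsOrder (t : String) : Bool :=
  PySem.Str.startswith (PySem.Str.lower t) "#" || PySem.Str.startswith (PySem.Str.lower t) "ord"

-- '@' in t and '.' in t
def pvIsEmail (t : String) : Bool :=
  PySem.Str.isIn "@" t && PySem.Str.isIn "." t

def extract_entities_rule_alt (text : String) : List (String × String) :=
  let tokens := PySem.Str.split₀ text
  let orders := tokens.filter pvIsOrder
  let emails := tokens.filter pvIsEmail
  (match orders.getLast? with
   | some t => [("order_id", PySem.Str.stripChars t ".,")]
   | none => []) ++
  (match emails.getLast? with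
   | some t => [("email", PySem.Str.stripChars t ".,")]
   | none => [])

-- ===== PRECONDITION & SPEC =====
-- Pre_ excludes texts in which the first email-shaped token strictly precedes the first
-- order-shaped token: there A's dict-key insertion order (email before order_id) is an
-- accident of its loop; the dict VALUES agree everywhere, only the key order differs.
def Pre_extract_entities_rule (text : String) : Prop :=
  ((PySem.Str.split₀ text).findIdx?
      (fun t => PySem.Str.startswith (PySem.Str.lower t) "#"
             || PySem.Str.startswith (PySem.Str.lower t) "ord")).all
    (fun i => ((PySem.Str.split₀ text).findIdx?
      (fun t => PySem.Str.isIn "@" t && PySem.Str.isIn "." t)).all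
        (fun j => decide (i ≤ j))) = true
instance (text : String) : Decidable (Pre_extract_entities_rule text) := by
  unfold Pre_extract_entities_rule; infer_instance

def pvWitness_extract_entities_rule : String := "#12 from a@b.c"

def Spec_extract_entities_rule (text : String) (out : List (String × String)) : Prop :=
  out = extract_entities_rule_alt text
instance (text : String) (out : List (String × String)) :
    Decidable (Spec_extract_entities_rule text out) := by
  unfold Spec_extract_entities_rule; infer_instance

-- ===== CLAIM =====
def Claim_equal_extract_entities_rule : Prop :=
  ∀ (text : String), Dom_extract_entities_rule text → Pre_extract_entities_rule text →
    Spec_extract_entities_rule text (extract_entities_rule text)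

-- ===== LEMMAS AND PROOFS =====

-- proof-side view of A's loop: index-tagged match lists and the dict they assemble
def pvMatches (p : String → Bool) (ts : List String) : List (Int × String) :=
  (PySem.List.enumerate ts 0).filter (fun it => p it.2)

def pvLastVal (l : List (Int × String)) : String :=
  PySem.Str.stripChars ((l.getLast?.map Prod.snd).getD "") ".,"

def pvAssemble (o e : List (Int × String)) : List (String × String) :=
  match o, e with
  | [], [] => []
  | _ :: _, [] => [("order_id", pvLastVal o)]
  | [], _ :: _ => [("email", pvLastVal e)]
  | op :: _, ep :: _ =>
      if op.1 ≤ ep.1 then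
        [("order_id", pvLastVal o), ("email", pvLastVal e)]
      else
        [("email", pvLastVal e), ("order_id", pvLastVal o)]

theorem pv_enum_append {α : Type} (ts : List α) (t : α) (s : Int) :
    PySem.List.enumerate (ts ++ [t]) s = PySem.List.enumerate ts s ++ [(s + ts.length, t)] := by
  induction ts generalizing s with
  | nil => simp [PySem.List.enumerate_nil, PySem.List.enumerate_cons]
  | cons x xs ih => simp [PySem.List.enumerate_cons, ih]; ring

theorem pv_matches_fst_lt (p : String → Bool) (ts : List String) (q : Int × String)
    (h : q ∈ pvMatches p ts) : q.1 < (ts.length : Int) := by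
  have hm : q ∈ PySem.List.enumerate ts 0 := (List.mem_filter.mp h).1
  have h1 : q.1 ∈ (PySem.List.enumerate ts 0).map (·.1) := List.mem_map_of_mem hm
  rw [PySem.List.map_fst_enumerate] at h1
  have := (PySem.List.mem_pyRange_one.mp h1).2
  omega

theorem pv_matches_append (p : String → Bool) (ts : List String) (t : String) :
    pvMatches p (ts ++ [t])
      = pvMatches p ts ++ (if p t then [((ts.length : Int), t)] else []) := by
  simp [pvMatches, pv_enum_append, List.filter_append, List.filter]
  cases p t <;> rfl

theorem pv_getLast_cons_concat {α : Type} (a b : α) (l : List α) :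
    (a :: (l ++ [b])).getLast? = some b := by
  rw [← List.cons_append, List.getLast?_concat]

theorem pv_step (o e : List (Int × String)) (n : Int) (t : String)
    (ho : ∀ q ∈ o, q.1 < n) (he : ∀ q ∈ e, q.1 < n) :
    pvStepA (PySem.Dict.mk (pvAssemble o e)) t
      = PySem.Dict.mk (pvAssemble (o ++ if pvIsOrder t then [(n, t)] else [])
                                  (e ++ if pvIsEmail t then [(n, t)] else [])) := by
  have hOd : (PySem.Str.startswith (PySem.Str.lower t) "#"
      || PySem.Str.startswith (PySem.Str.lower t) "ord") = pvIsOrder t := rfl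
  have hEd : (PySem.Str.isIn "@" t && PySem.Str.isIn "." t) = pvIsEmail t := rfl
  unfold pvStepA
  rw [hOd, hEd]
  cases hO : pvIsOrder t <;> cases hE : pvIsEmail t <;>
    rcases o with _ | ⟨op, os⟩ <;> rcases e with _ | ⟨ep, es⟩ <;>
    simp only [Bool.false_eq_true, if_true, if_false,
      List.append_nil, List.nil_append, List.cons_append] <;>
    (try have hep : ep.1 < n := he ep (by simp)) <;>
    (try have hop : op.1 < n := ho op (by simp)) <;>
    simp [pvAssemble, pvLastVal, PySem.Dict.insert, PySem.Dict.contains] <;>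
    (try split_ifs) <;> first | (simp_all [pv_getLast_cons_concat]; done) | omega

theorem pv_main (ts : List String) :
    ts.foldl pvStepA PySem.Dict.empty
      = PySem.Dict.mk (pvAssemble (pvMatches pvIsOrder ts) (pvMatches pvIsEmail ts)) := by
  induction ts using List.reverseRecOn with
  | nil => rfl
  | append_singleton ts t ih =>
      rw [List.foldl_append, List.foldl_cons, List.foldl_nil, ih,
        pv_matches_append, pv_matches_append]
      exact pv_step _ _ _ t (fun q hq => pv_matches_fst_lt _ ts q hq)
        (fun q hq => pv_matches_fst_lt _ ts q hq)

-- head index of the proof-side match list = findIdx? of the predicate, shifted by the start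
theorem pv_head_matches (p : String → Bool) (ts : List String) (s : Int) :
    ((PySem.List.enumerate ts s).filter (fun it => p it.2)).head?.map Prod.fst
      = (ts.findIdx? p).map (fun n => s + (n : Int)) := by
  induction ts generalizing s with
  | nil => simp [PySem.List.enumerate_nil]
  | cons x xs ih =>
      rw [PySem.List.enumerate_cons, List.findIdx?_cons]
      by_cases hx : p x = true
      · simp [hx]
      · simp only [List.filter_cons, hx, Bool.false_eq_true, if_false, ih]
        rcases xs.findIdx? p with _ | n
        · simp
        · simp
          ring

-- snd-projection of the proof-side match list = B's comprehension
theorem pv_snd_matches (p : String → Bool) (ts : List String) :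
    (pvMatches p ts).map Prod.snd = ts.filter p := by
  have : ts.filter p = ((PySem.List.enumerate ts 0).map (·.2)).filter p := by
    rw [PySem.List.map_snd_enumerate]
  rw [this, List.filter_map]
  rfl

-- ===== VERDICT (by name: the statement is the Claim_ definition above) =====
theorem extract_entities_rule_spec : Claim_equal_extract_entities_rule := by
  intro text _ hpre
  show _ = _
  unfold extract_entities_rule extract_entities_rule_alt
  rw [pv_main]
  set ts := PySem.Str.split₀ text with hts
  unfold Pre_extract_entities_rule at hpre
  rw [← hts] at hpre
  have ho : (pvMatches pvIsOrder ts).head?.map Prod.fst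
      = (ts.findIdx? pvIsOrder).map (fun n => ((n : Int))) := by
    simpa [pvMatches] using pv_head_matches pvIsOrder ts 0
  have he : (pvMatches pvIsEmail ts).head?.map Prod.fst
      = (ts.findIdx? pvIsEmail).map (fun n => ((n : Int))) := by
    simpa [pvMatches] using pv_head_matches pvIsEmail ts 0
  have hos := pv_snd_matches pvIsOrder ts
  have hes := pv_snd_matches pvIsEmail ts
  -- dict items of an assembled literal list are the list itself
  rcases hO : pvMatches pvIsOrder ts with _ | ⟨op, os⟩ <;>
    rcases hE : pvMatches pvIsEmail ts with _ | ⟨ep, es⟩ <;>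
    rw [hO] at ho hos <;> rw [hE] at he hes <;>
    simp only [← hos, ← hes, List.getLast?_map]
  · rfl
  · rcases hgl : (ep :: es).getLast? with _ | q
    · simp at hgl
    · simp [pvAssemble, pvLastVal, hgl]
  · rcases hgl : (op :: os).getLast? with _ | q
    · simp at hgl
    · simp [pvAssemble, pvLastVal, hgl]
  · -- both present: Pre_ forces op.1 ≤ ep.1
    have hle : op.1 ≤ ep.1 := by
      have ho' : (some op).map Prod.fst = (ts.findIdx? pvIsOrder).map (fun n => ((n : Int))) := by
        simpa using ho
      have he' : (some ep).map Prod.fst = (ts.findIdx? pvIsEmail).map (fun n => ((n : Int))) := by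
        simpa using he
      rcases hio : ts.findIdx? pvIsOrder with _ | i
      · rw [hio] at ho'; simp at ho'
      rcases hie : ts.findIdx? pvIsEmail with _ | j
      · rw [hie] at he'; simp at he'
      rw [hio] at ho'; rw [hie] at he'
      simp at ho' he'
      have hij : i ≤ j := by
        have : (ts.findIdx? pvIsOrder).all
            (fun i => (ts.findIdx? pvIsEmail).all (fun j => decide (i ≤ j))) = true := hpre
        rw [hio, hie] at this
        simpa using this
      omega
    rcases hglo : (op :: os).getLast? with _ | q
    · simp at hglo
    rcases hgle : (ep :: es).getLast? with _ | r
    · simp at hgle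
    simp [pvAssemble, hle, pvLastVal, hglo, hgle]
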